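-- pv_equiv track=rewrite | github.com/LykkeCorp/ATTMO_python | postprocess/postprocess.py | find_last_non_zero_indices
-- ===== SOURCE A (Python) =====
-- def find_last_non_zero_indices(lst):
--     non_zero_indices = []
--     last_non_zero_index = None
--     for i, num in enumerate(lst):
--         if num != 0:
--             last_non_zero_index = i
--         elif num == 0 and last_non_zero_index is not None:
--             non_zero_indices.append(last_non_zero_index)
--             last_non_zero_index = None
--     # Append the index of the last non-zero element if the list ends with non-zero values
--     if last_non_zero_index is not None:
--         non_zero_indices.append(last_non_zero_index)
--     return non_zero_indices
-- ===== SOURCE B (Python) =====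
-- def find_last_non_zero_indices(lst):
--     n = len(lst)
--     return [i for i, num in enumerate(lst) if num != 0 and (i + 1 == n or lst[i + 1] == 0)]
-- ===== Notes on version B (the rewrite author's own statement) =====
-- stated objective: simpler
-- what changed: Replaced A's stateful scan (carrying a pending last-non-zero index, emitting on a zero transition, with a final flush) by a stateless one-line filter that keeps index i iff lst[i] != 0 and the successor is absent or zero.
import Mathlib
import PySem

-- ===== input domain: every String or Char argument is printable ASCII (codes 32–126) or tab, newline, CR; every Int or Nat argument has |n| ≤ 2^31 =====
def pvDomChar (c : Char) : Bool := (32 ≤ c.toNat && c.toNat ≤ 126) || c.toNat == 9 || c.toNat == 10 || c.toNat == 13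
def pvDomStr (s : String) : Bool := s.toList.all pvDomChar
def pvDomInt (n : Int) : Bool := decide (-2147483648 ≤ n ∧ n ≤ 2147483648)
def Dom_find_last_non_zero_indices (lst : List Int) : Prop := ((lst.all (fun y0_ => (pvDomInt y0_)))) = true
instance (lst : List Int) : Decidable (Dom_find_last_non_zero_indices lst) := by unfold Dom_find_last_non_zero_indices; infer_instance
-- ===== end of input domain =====

-- B replaces A's stateful transition scan by a stateless successor-peek filter (simpler; same O(n) cost).


-- ===== PORT A =====
-- loop over enumerate(lst) carrying last_non_zero_index; after the loop, flush a pending index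
def goA : List Int → Int → Option Int → List Int
  | [], _, last =>
      match last with
      | some j => [j]
      | none => []
  | num :: rest, i, last =>
      if num ≠ 0 then goA rest (i + 1) (some i)
      else
        match last with
        | some j => j :: goA rest (i + 1) none
        | none => goA rest (i + 1) none

def find_last_non_zero_indices (lst : List Int) : List Int := goA lst 0 none

-- ===== PORT B =====
-- filtering pass: keep index i iff element ≠ 0 and the successor is absent or zero
def goB : List Int → Int → List Int
  | [], _ => []
  | num :: rest, i =>
      if num ≠ 0 ∧ (rest = [] ∨ rest.headD 0 = 0) then i :: goB rest (i + 1)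
      else goB rest (i + 1)

def find_last_non_zero_indices_alt (lst : List Int) : List Int := goB lst 0

-- ===== PRECONDITION & SPEC =====
def Spec_find_last_non_zero_indices (lst : List Int) (out : List Int) : Prop := out = find_last_non_zero_indices_alt lst
instance (lst : List Int) (out : List Int) : Decidable (Spec_find_last_non_zero_indices lst out) := by unfold Spec_find_last_non_zero_indices; infer_instance

-- ===== CLAIM (what is proved, stated in full; the proofs are below) =====
def Claim_equal_find_last_non_zero_indices : Prop := ∀ (lst : List Int), Dom_find_last_non_zero_indices lst → Spec_find_last_non_zero_indices lst (find_last_non_zero_indices lst)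

-- ===== LEMMAS AND PROOFS =====

-- the pending index is emitted exactly when the rest of the list starts with a zero (or ends)
def pend (last : Option Int) (lst : List Int) : List Int :=
  match last with
  | some j => if lst.headD 0 = 0 then [j] else []
  | none => []

theorem goA_eq_pend_goB (lst : List Int) : ∀ (i : Int) (last : Option Int),
    goA lst i last = pend last lst ++ goB lst i := by
  induction lst with
  | nil =>
      intro i last
      cases last <;> simp [goA, goB, pend]
  | cons num rest ih =>
      intro i last
      by_cases h : num = 0
      · subst h
        cases last <;> simp [goA, goB, pend, ih]
      · cases last <;>
          · rw [goA, if_pos h, ih]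
            cases rest with
            | nil => simp [goB, pend, h]
            | cons y t => by_cases h2 : y = 0 <;> simp [goB, pend, h, h2]

-- ===== VERDICT (by name: the statement is the Claim_ definition above) =====
theorem find_last_non_zero_indices_spec : Claim_equal_find_last_non_zero_indices := by
  intro lst _
  unfold Spec_find_last_non_zero_indices find_last_non_zero_indices find_last_non_zero_indices_alt
  simpa [pend] using goA_eq_pend_goB lst 0 none
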